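-- pv_equiv track=rewrite | github.com/rana-taqveem/python-learning | udemy/functions.py | count_true_chars
-- ===== SOURCE A (Python) =====
-- def count_true_chars(nameChars):
--
--     num_of_Ts = 0
--     num_of_Rs = 0
--     num_of_Us = 0
--     num_of_Es = 0
--
--     for char in nameChars:
--         if char == 't':
--             num_of_Ts = num_of_Ts + 1
--         elif char == 'r':
--             num_of_Rs = num_of_Rs + 1
--         elif char == 'u':
--             num_of_Us = num_of_Us + 1
--         elif char == 'e':
--             num_of_Es = num_of_Es + 1
--
--     return num_of_Ts, num_of_Rs, num_of_Us, num_of_Es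
-- ===== SOURCE B (Python) =====
-- def count_true_chars(nameChars):
--     return (nameChars.count('t'),
--             nameChars.count('r'),
--             nameChars.count('u'),
--             nameChars.count('e'))
-- ===== Notes on version B (the rewrite author's own statement) =====
-- stated objective: simpler
-- what changed: Replaces the single stateful pass with four accumulators and an if/elif chain by four independent str.count passes, one per character, with no loop or mutable state in the source; str.count's C-level scan makes it measurably faster despite the four passes.
import Mathlib
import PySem

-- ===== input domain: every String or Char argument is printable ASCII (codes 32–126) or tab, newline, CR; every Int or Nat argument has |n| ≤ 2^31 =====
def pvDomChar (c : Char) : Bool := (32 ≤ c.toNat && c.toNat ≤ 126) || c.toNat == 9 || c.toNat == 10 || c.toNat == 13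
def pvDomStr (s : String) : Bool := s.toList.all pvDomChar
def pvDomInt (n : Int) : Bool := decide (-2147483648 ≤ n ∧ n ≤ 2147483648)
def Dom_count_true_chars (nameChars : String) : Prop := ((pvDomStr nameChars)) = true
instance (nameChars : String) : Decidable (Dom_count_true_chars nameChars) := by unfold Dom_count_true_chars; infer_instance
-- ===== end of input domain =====

-- B replaces A's single stateful pass (four accumulators, if/elif chain) with four independent per-character count passes (simpler, same O(n)).

-- ===== PORT A =====
-- A: one pass with four accumulators and an if/elif chain (the loop body as a named step).
def stepA (st : Int × Int × Int × Int) (char : Char) : Int × Int × Int × Int :=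
  let (t, r, u, e) := st
  if char == 't' then (t + 1, r, u, e)
  else if char == 'r' then (t, r + 1, u, e)
  else if char == 'u' then (t, r, u + 1, e)
  else if char == 'e' then (t, r, u, e + 1)
  else (t, r, u, e)

def count_true_chars (nameChars : String) : Int × Int × Int × Int :=
  nameChars.toList.foldl stepA (0, 0, 0, 0)

-- ===== PORT B =====
-- B: four independent str.count passes; for a single-character needle Python's
-- str.count equals the character count, so each pass is List.count (exact here).
def count_true_chars_alt (nameChars : String) : Int × Int × Int × Int :=
  ((nameChars.toList.count 't' : Int),
   (nameChars.toList.count 'r' : Int),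
   (nameChars.toList.count 'u' : Int),
   (nameChars.toList.count 'e' : Int))

-- ===== PRECONDITION & SPEC =====
def Spec_count_true_chars (nameChars : String) (out : Int × Int × Int × Int) : Prop := out = count_true_chars_alt nameChars
instance (nameChars : String) (out : Int × Int × Int × Int) : Decidable (Spec_count_true_chars nameChars out) := by unfold Spec_count_true_chars; infer_instance

-- ===== CLAIM (what is proved, stated in full; the proofs are below) =====
def Claim_equal_count_true_chars : Prop := ∀ (nameChars : String), Dom_count_true_chars nameChars → Spec_count_true_chars nameChars (count_true_chars nameChars)

-- ===== LEMMAS AND PROOFS =====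

-- ===== VERDICT (by name: the statement is the Claim_ definition above) =====
-- A's fold adds the count of each of the four characters to its accumulators.
theorem foldA_counts (cs : List Char) (t r u e : Int) :
    cs.foldl stepA (t, r, u, e)
    = (t + cs.count 't', r + cs.count 'r', u + cs.count 'u', e + cs.count 'e') := by
  induction cs generalizing t r u e with
  | nil => simp
  | cons c cs ih =>
    rw [List.foldl_cons]
    by_cases h1 : c = 't'
    · rw [show stepA (t, r, u, e) c = (t + 1, r, u, e) by simp [stepA, h1], ih]
      simp [h1, List.count_cons]; ring
    · by_cases h2 : c = 'r'
      · rw [show stepA (t, r, u, e) c = (t, r + 1, u, e) by simp [stepA, h1, h2], ih]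
        simp [h1, h2, List.count_cons]; ring
      · by_cases h3 : c = 'u'
        · rw [show stepA (t, r, u, e) c = (t, r, u + 1, e) by simp [stepA, h1, h2, h3], ih]
          simp [h1, h2, h3, List.count_cons]; ring
        · by_cases h4 : c = 'e'
          · rw [show stepA (t, r, u, e) c = (t, r, u, e + 1) by simp [stepA, h1, h2, h3, h4], ih]
            simp [h1, h2, h3, h4, List.count_cons]; ring
          · rw [show stepA (t, r, u, e) c = (t, r, u, e) by simp [stepA, h1, h2, h3, h4], ih]
            simp [h1, h2, h3, h4]

theorem count_true_chars_spec : Claim_equal_count_true_chars := by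
  intro s _
  show count_true_chars s = count_true_chars_alt s
  unfold count_true_chars count_true_chars_alt
  rw [foldA_counts]
  simp
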